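-- pv_equiv track=rewrite | github.com/DmitryKireev69/tasks | task_09.py | connect_dicts
-- ===== SOURCE A (Python) =====
-- def connect_dicts(dict1: dict[str, int], dict2: dict[str, int]) -> dict[str, int]:
--     """
--     Соединяет два словаря по определенным правилам:
--     1. Приоритетный словарь определяется по сумме значений
--     2. Удаляются ключи со значениями < 10
--     3. Результат сортируется по значениям в порядке возрастания
--
--     :param dict1: первый словарь
--     :param dict2: второй словарь
--     :return: объединенный и отсортированный словарь
--     """
--
--     sum1 = sum(dict1.values())
--     sum2 = sum(dict2.values())
--
--     priority_dict = dict2 if sum2 >= sum1 else dict1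
--     secondary_dict = dict1 if priority_dict is dict2 else dict2
--
--     result = {}
--
--     for key, value in priority_dict.items():
--         if value >= 10:
--             result[key] = value
--
--     for key, value in secondary_dict.items():
--         if value >= 10 and key not in result:
--             result[key] = value
--
--     return dict(sorted(result.items(), key=lambda item: item[1]))
-- ===== SOURCE B (Python) =====
-- def _insert_sorted(out: list, k: str, v: int) -> None:
--     # insert (k, v) before the first entry with a strictly larger value,
--     # so entries with equal values keep insertion order
--     i = 0
--     while i < len(out) and out[i][1] <= v:
--         i += 1
--     out.insert(i, (k, v))
--
--
-- def connect_dicts(dict1: dict[str, int], dict2: dict[str, int]) -> dict[str, int]: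
--     # Online insertion sort: the result list is kept sorted by value at every step,
--     # so there is no intermediate result dict and no final sorted() pass; a secondary
--     # entry's survival is decided upfront against the precomputed kept priority keys.
--     pri, sec = (dict2, dict1) if sum(dict2.values()) >= sum(dict1.values()) else (dict1, dict2)
--     kept_pri_keys = {k for k, v in pri.items() if v >= 10}
--     out: list[tuple[str, int]] = []
--     for k, v in pri.items():
--         if v >= 10:
--             _insert_sorted(out, k, v)
--     for k, v in sec.items():
--         if v >= 10 and k not in kept_pri_keys:
--             _insert_sorted(out, k, v)
--     return dict(out)
-- ===== Notes on version B (the rewrite author's own statement) =====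
-- stated objective: alternative
-- what changed: A collects surviving entries into a result dict (second loop guarded by membership in the evolving result) and sorts once at the end; B never builds a result dict and never sorts: it keeps the output list sorted at every step by inserting each surviving entry at its value position (online insertion sort), deciding a secondary entry's survival upfront against the precomputed set of kept priority keys.
import Mathlib
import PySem

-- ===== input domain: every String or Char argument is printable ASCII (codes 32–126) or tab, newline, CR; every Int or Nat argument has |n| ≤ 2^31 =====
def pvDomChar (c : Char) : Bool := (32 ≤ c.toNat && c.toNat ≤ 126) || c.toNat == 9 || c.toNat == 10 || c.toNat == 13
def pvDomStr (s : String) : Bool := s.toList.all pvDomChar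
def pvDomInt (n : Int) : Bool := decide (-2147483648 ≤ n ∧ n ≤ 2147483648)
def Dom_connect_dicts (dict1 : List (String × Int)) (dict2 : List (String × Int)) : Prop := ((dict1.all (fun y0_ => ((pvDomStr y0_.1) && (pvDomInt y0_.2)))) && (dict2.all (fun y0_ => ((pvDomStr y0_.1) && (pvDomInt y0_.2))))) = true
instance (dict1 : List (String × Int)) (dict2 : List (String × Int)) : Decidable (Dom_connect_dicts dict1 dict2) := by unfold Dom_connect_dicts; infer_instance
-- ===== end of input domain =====

-- B keeps the output sorted at every step by inserting each surviving entry at its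
-- value position (online insertion sort), with no result dict and no final sort;
-- objective: alternative.

-- ===== PORT A =====
-- `priority_dict is dict2` holds exactly when sum2 >= sum1 (the branch that chose it),
-- so secondary_dict is ported with the same condition.
def connect_dicts (dict1 : List (String × Int)) (dict2 : List (String × Int)) : List (String × Int) :=
  let sum1 := (dict1.map Prod.snd).sum
  let sum2 := (dict2.map Prod.snd).sum
  let priority_dict := if sum2 ≥ sum1 then dict2 else dict1
  let secondary_dict := if sum2 ≥ sum1 then dict1 else dict2
  let result : PySem.Dict String Int :=
    priority_dict.foldl (fun r kv => if 10 ≤ kv.2 then r.insert kv.1 kv.2 else r) PySem.Dict.empty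
  let result2 : PySem.Dict String Int :=
    secondary_dict.foldl
      (fun r kv => if 10 ≤ kv.2 ∧ r.contains kv.1 = false then r.insert kv.1 kv.2 else r) result
  PySem.List.sorted result2.items (fun kv => kv.2) false

-- ===== PORT B =====
-- Source B's _insert_sorted: walk past entries with value ≤ v, insert (k, v) there
def pvInsertSorted (out : List (String × Int)) (k : String) (v : Int) : List (String × Int) :=
  match out with
  | [] => [(k, v)]
  | kv :: rest => if kv.2 ≤ v then kv :: pvInsertSorted rest k v else (k, v) :: kv :: rest

def connect_dicts_alt (dict1 : List (String × Int)) (dict2 : List (String × Int)) : List (String × Int) :=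
  let pri := if (dict2.map Prod.snd).sum ≥ (dict1.map Prod.snd).sum then dict2 else dict1
  let sec := if (dict2.map Prod.snd).sum ≥ (dict1.map Prod.snd).sum then dict1 else dict2
  let kept : PySem.Set String :=
    PySem.Set.ofList ((pri.filter (fun kv => decide (10 ≤ kv.2))).map Prod.fst)
  let out :=
    pri.foldl (fun out kv => if 10 ≤ kv.2 then pvInsertSorted out kv.1 kv.2 else out) []
  sec.foldl
    (fun out (kv : String × Int) =>
      if 10 ≤ kv.2 ∧ kept.contains kv.1 = false then pvInsertSorted out kv.1 kv.2 else out) out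

-- ===== PRECONDITION & SPEC =====
-- The list arguments stand for Python dicts, whose keys are necessarily distinct;
-- Pre_ states exactly that (it excludes no input an actual Python call can produce).
def Pre_connect_dicts (dict1 : List (String × Int)) (dict2 : List (String × Int)) : Prop :=
  (dict1.map Prod.fst).Nodup ∧ (dict2.map Prod.fst).Nodup
instance (dict1 : List (String × Int)) (dict2 : List (String × Int)) : Decidable (Pre_connect_dicts dict1 dict2) := by unfold Pre_connect_dicts; infer_instance

def pvWitness_connect_dicts : (List (String × Int)) × (List (String × Int)) :=
  ([("a", 12), ("b", 3), ("c", 15)], [("a", 20), ("d", 11)])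

def Spec_connect_dicts (dict1 : List (String × Int)) (dict2 : List (String × Int)) (out : List (String × Int)) : Prop := out = connect_dicts_alt dict1 dict2
instance (dict1 : List (String × Int)) (dict2 : List (String × Int)) (out : List (String × Int)) : Decidable (Spec_connect_dicts dict1 dict2 out) := by unfold Spec_connect_dicts; infer_instance

-- ===== CLAIM (what is proved, stated in full; the proofs are below) =====
def Claim_equal_connect_dicts : Prop := ∀ (dict1 : List (String × Int)) (dict2 : List (String × Int)), Dom_connect_dicts dict1 dict2 → Pre_connect_dicts dict1 dict2 → Spec_connect_dicts dict1 dict2 (connect_dicts dict1 dict2)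

-- ===== LEMMAS AND PROOFS =====

-- B's hand-written linear insertion is PySem's insertBy with the value key
theorem pvInsertSorted_eq_insertBy (out : List (String × Int)) (k : String) (v : Int) :
    pvInsertSorted out k v
      = PySem.List.insertBy (fun a b : String × Int => decide (a.2 < b.2)) (k, v) out := by
  induction out with
  | nil => rfl
  | cons kv rest ih =>
    by_cases h : kv.2 ≤ v
    · simp [pvInsertSorted, PySem.List.insertBy, h, not_lt_of_ge h, ih]
    · simp [pvInsertSorted, PySem.List.insertBy, h, lt_of_not_ge h]


-- fold two pointwise-equal step functions: same result
theorem foldl_step_congr {α β : Type} (f g : β → α → β) (l : List α) (init : β)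
    (h : ∀ acc x, f acc x = g acc x) : l.foldl f init = l.foldl g init := by
  induction l generalizing init with
  | nil => rfl
  | cons x xs ih => simp only [List.foldl_cons, h, ih]

-- the second loop of A: with distinct keys in `l`, the guarded insertions append
-- exactly the entries that pass the value test and are not already in `D`
theorem loop2_items (l : List (String × Int)) (D : PySem.Dict String Int)
    (h : (l.map Prod.fst).Nodup) :
    (l.foldl (fun r kv => if 10 ≤ kv.2 ∧ r.contains kv.1 = false then r.insert kv.1 kv.2 else r) D).items
      = D.items ++ l.filter (fun kv => decide (10 ≤ kv.2) && !(D.contains kv.1)) := by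
  induction l generalizing D with
  | nil => simp
  | cons kv l ih =>
    simp only [List.map_cons, List.nodup_cons] at h
    obtain ⟨hk, hl⟩ := h
    by_cases hg : 10 ≤ kv.2 ∧ D.contains kv.1 = false
    · simp only [List.foldl_cons, if_pos hg, ih _ hl]
      rw [PySem.Dict.items_insert_of_not_contains D kv.2 hg.2]
      have hfc : l.filter (fun x => decide (10 ≤ x.2) && !((D.insert kv.1 kv.2).contains x.1))
          = l.filter (fun x => decide (10 ≤ x.2) && !(D.contains x.1)) := by
        apply List.filter_congr
        intro x hx
        have hne : x.1 ≠ kv.1 := fun he => hk (he ▸ List.mem_map_of_mem hx)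
        rw [PySem.Dict.contains_insert, show (x.1 == kv.1) = false by simpa using hne]
        simp
      rw [hfc, List.filter_cons_of_pos (by simp [hg.1, hg.2])]
      simp
    · simp only [List.foldl_cons, if_neg hg, ih _ hl]
      have hpred : (decide (10 ≤ kv.2) && !(D.contains kv.1)) = false := by
        by_cases h10 : 10 ≤ kv.2
        · rcases Bool.eq_false_or_eq_true (D.contains kv.1) with hc | hc
          · simp [hc]
          · exact absurd ⟨h10, hc⟩ hg
        · simp [h10]
      rw [List.filter_cons_of_neg (by simp [hpred])]

-- core equality for a fixed priority/secondary pair with distinct keys each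
theorem connect_core (pri sec : List (String × Int))
    (hp : (pri.map Prod.fst).Nodup) (hs : (sec.map Prod.fst).Nodup) :
    PySem.List.sorted
      ((sec.foldl
          (fun r kv => if 10 ≤ kv.2 ∧ r.contains kv.1 = false then r.insert kv.1 kv.2 else r)
          (pri.foldl (fun r kv => if 10 ≤ kv.2 then r.insert kv.1 kv.2 else r)
            PySem.Dict.empty)).items)
      (fun kv => kv.2) false
    = sec.foldl
        (fun out kv =>
          if 10 ≤ kv.2 ∧ (PySem.Set.ofList
              ((pri.filter (fun kv => decide (10 ≤ kv.2))).map Prod.fst)).contains kv.1 = false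
          then pvInsertSorted out kv.1 kv.2 else out)
        (pri.foldl (fun out kv => if 10 ≤ kv.2 then pvInsertSorted out kv.1 kv.2 else out) []) := by
  set fp : List (String × Int) := pri.filter (fun kv => decide (10 ≤ kv.2)) with hfp
  have hfpsub : (fp.map Prod.fst).Sublist (pri.map Prod.fst) :=
    List.Sublist.map Prod.fst List.filter_sublist
  -- A's first loop builds the dict whose items are exactly the kept priority entries
  have h1 : (pri.foldl (fun r kv => if 10 ≤ kv.2 then r.insert kv.1 kv.2 else r)
        (PySem.Dict.empty : PySem.Dict String Int)).items = fp := by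
    rw [PySem.List.foldl_ite_eq_foldl_filter (fun kv : String × Int => 10 ≤ kv.2)
      (fun r kv => r.insert kv.1 kv.2) pri PySem.Dict.empty]
    have hfresh := PySem.Dict.items_foldl_insert_fresh (κ := String) (ν := Int) fp Prod.fst
      Prod.snd PySem.Dict.empty (fun a _ => PySem.Dict.contains_empty a.1) (hp.sublist hfpsub)
    simpa [show (PySem.Dict.empty : PySem.Dict String Int).items = [] from rfl] using hfresh
  -- membership in that dict agrees with membership in B's kept-keys set
  have hcont : ∀ k : String,
      (pri.foldl (fun r kv => if 10 ≤ kv.2 then r.insert kv.1 kv.2 else r)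
          (PySem.Dict.empty : PySem.Dict String Int)).contains k
        = (PySem.Set.ofList (fp.map Prod.fst)).contains k := by
    intro k
    rw [PySem.Dict.contains_eq_decide_mem_keys]
    simp [PySem.Dict.keys, h1, PySem.Set.mem_ofList]
  -- A's second loop appends the surviving secondary entries
  rw [loop2_items sec _ hs, h1]
  -- both sides as insertion-sort folds
  rw [PySem.List.sorted_eq_foldl_insertBy, List.foldl_append]
  -- priority part
  have hpriB : pri.foldl (fun out kv => if 10 ≤ kv.2 then pvInsertSorted out kv.1 kv.2 else out)
        ([] : List (String × Int))
      = fp.foldl (fun acc x =>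
          PySem.List.insertBy (fun a b : String × Int => decide (a.2 < b.2)) x acc) [] := by
    rw [PySem.List.foldl_ite_eq_foldl_filter (fun kv : String × Int => 10 ≤ kv.2)
      (fun out kv => pvInsertSorted out kv.1 kv.2) pri []]
    exact foldl_step_congr _ _ _ _ (fun acc x => pvInsertSorted_eq_insertBy acc x.1 x.2)
  -- secondary part: same guard, same step
  have hsecP : ∀ kv : String × Int,
      (decide (10 ≤ kv.2) && !((PySem.Set.ofList (fp.map Prod.fst)).contains kv.1))
        = decide (10 ≤ kv.2 ∧ (PySem.Set.ofList (fp.map Prod.fst)).contains kv.1 = false) := by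
    intro kv
    rcases Bool.eq_false_or_eq_true ((PySem.Set.ofList (fp.map Prod.fst)).contains kv.1) with hc | hc <;> rw [hc] <;> simp
  calc (sec.filter (fun kv => decide (10 ≤ kv.2)
            && !((pri.foldl (fun r kv => if 10 ≤ kv.2 then r.insert kv.1 kv.2 else r)
                  (PySem.Dict.empty : PySem.Dict String Int)).contains kv.1))).foldl
          (fun acc x => PySem.List.insertBy (fun a b : String × Int => decide (a.2 < b.2)) x acc)
          (fp.foldl (fun acc x =>
            PySem.List.insertBy (fun a b : String × Int => decide (a.2 < b.2)) x acc) [])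
      = (sec.filter (fun kv => decide (10 ≤ kv.2 ∧
            (PySem.Set.ofList (fp.map Prod.fst)).contains kv.1 = false))).foldl
          (fun acc x => PySem.List.insertBy (fun a b : String × Int => decide (a.2 < b.2)) x acc)
          (fp.foldl (fun acc x =>
            PySem.List.insertBy (fun a b : String × Int => decide (a.2 < b.2)) x acc) []) := by
        congr 1
        apply List.filter_congr
        intro kv _
        rw [hcont kv.1, hsecP kv]
    _ = sec.foldl
          (fun out kv =>
            if 10 ≤ kv.2 ∧ (PySem.Set.ofList (fp.map Prod.fst)).contains kv.1 = false
            then pvInsertSorted out kv.1 kv.2 else out)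
          (pri.foldl (fun out kv => if 10 ≤ kv.2 then pvInsertSorted out kv.1 kv.2 else out) []) := by
        rw [hpriB,
          PySem.List.foldl_ite_eq_foldl_filter
            (fun kv : String × Int =>
              10 ≤ kv.2 ∧ (PySem.Set.ofList (fp.map Prod.fst)).contains kv.1 = false)
            (fun out kv => pvInsertSorted out kv.1 kv.2) sec]
        exact foldl_step_congr _ _ _ _ (fun acc x => (pvInsertSorted_eq_insertBy acc x.1 x.2).symm)

-- ===== VERDICT (by name: the statement is the Claim_ definition above) =====
theorem connect_dicts_spec : Claim_equal_connect_dicts := by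
  intro dict1 dict2 _ hpre
  unfold Spec_connect_dicts
  simp only [connect_dicts, connect_dicts_alt]
  by_cases hc : (dict2.map Prod.snd).sum ≥ (dict1.map Prod.snd).sum
  · simp only [if_pos hc]
    exact connect_core dict2 dict1 hpre.2 hpre.1
  · simp only [if_neg hc]
    exact connect_core dict1 dict2 hpre.1 hpre.2
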